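-- pv_equiv track=rewrite | github.com/Aparnamohan1312/PascalPacman | extra_credit.py | bfs_pascals_triangle
-- ===== SOURCE A (Python) =====
-- from collections import deque
--
-- def bfs_pascals_triangle(triangle, start, goal):
--     queue = deque([(0, 0, [])])
--
--     while queue:
--         i, j, path = queue.popleft()
--
--         if (i, j) == goal:
--             return path + [(i, j)]
--
--         for dx, dy in [(1, 0), (1, 1)]:
--             new_i, new_j = i + dx, j + dy
--             if 0 <= new_i < len(triangle) and 0 <= new_j < len(triangle[new_i]):
--                 queue.append((new_i, new_j, path + [(i, j)]))
--
--     return None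
-- ===== SOURCE B (Python) =====
-- def bfs_pascals_triangle(triangle, start, goal):
--     # Direct construction: the BFS above always returns the lexicographically
--     # first monotone path from (0,0) to goal -- stay in column max(0, gj-(gi-u))
--     # at each level u (down-left as long as possible, then down-right moves).
--     gi, gj = goal
--     if (gi, gj) == (0, 0):
--         return [(0, 0)]
--     if gj < 0 or gj > gi or gi >= len(triangle):
--         return None
--     path = [(0, 0)]
--     for u in range(1, gi + 1):
--         ju = max(0, gj - (gi - u))
--         if ju >= len(triangle[u]):
--             return None
--         path.append((u, ju))
--     return path
-- ===== Notes on version B (the rewrite author's own statement) =====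
-- stated objective: faster
-- what changed: A runs a breadth-first search over all monotone paths with no visited set (exponentially many queue entries); B directly constructs the path that BFS returns - the lexicographically first monotone path, which stays in column max(0, gj-(gi-u)) at each level u - after closed-form reachability checks.
import Mathlib
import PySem

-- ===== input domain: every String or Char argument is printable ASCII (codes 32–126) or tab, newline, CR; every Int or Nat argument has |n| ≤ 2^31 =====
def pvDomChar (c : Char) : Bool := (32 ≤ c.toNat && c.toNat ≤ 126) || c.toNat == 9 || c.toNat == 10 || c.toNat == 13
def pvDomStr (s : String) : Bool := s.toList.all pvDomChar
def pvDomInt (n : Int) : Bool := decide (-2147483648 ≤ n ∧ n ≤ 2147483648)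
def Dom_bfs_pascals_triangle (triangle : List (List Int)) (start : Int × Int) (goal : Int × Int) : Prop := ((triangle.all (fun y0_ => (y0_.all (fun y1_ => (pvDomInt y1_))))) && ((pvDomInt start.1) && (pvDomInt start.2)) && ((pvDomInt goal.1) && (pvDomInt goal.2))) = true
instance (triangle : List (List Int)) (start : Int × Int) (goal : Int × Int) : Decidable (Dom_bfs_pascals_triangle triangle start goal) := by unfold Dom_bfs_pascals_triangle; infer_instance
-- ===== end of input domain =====

-- B replaces A's exponential no-visited-set BFS by directly constructing the
-- path that BFS returns: the lexicographically first monotone path to the goal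
-- (column max(0, gj-(gi-u)) at each level u); objective: faster (O(goal row)).

-- length of row u of the triangle (only consulted after a bounds check, where
-- it is exactly Python's len(triangle[u]))
def pvRowlen (triangle : List (List Int)) (u : Int) : Int :=
  ((triangle.getD u.toNat []).length : Int)

-- ===== PORT A =====
-- the while-queue loop of A; children appended in the order (1,0) then (1,1).
-- The fuel argument is only a totality guard (it dominates the standard
-- 3^(levels-left) queue measure, proved in pvBfs_dec below, so it never runs out).
def bfsLoop (triangle : List (List Int)) (goal : Int × Int) :
    Nat → List (Int × Int × List (Int × Int)) → Option (List (Int × Int))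
  | 0, _ => none
  | _ + 1, [] => none
  | fuel + 1, (i, j, path) :: rest =>
    if (i, j) = goal then some (path ++ [(i, j)])
    else
      bfsLoop triangle goal fuel (rest ++
        (if 0 ≤ i + 1 ∧ i + 1 < (triangle.length : Int) ∧ 0 ≤ j ∧ j < pvRowlen triangle (i + 1)
         then [(i + 1, j, path ++ [(i, j)])] else []) ++
        (if 0 ≤ i + 1 ∧ i + 1 < (triangle.length : Int) ∧ 0 ≤ j + 1 ∧ j + 1 < pvRowlen triangle (i + 1)
         then [(i + 1, j + 1, path ++ [(i, j)])] else []))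

def bfs_pascals_triangle (triangle : List (List Int)) (start : Int × Int) (goal : Int × Int) : Option (List (Int × Int)) :=
  bfsLoop triangle goal (3 ^ (triangle.length + 1)) [(0, 0, [])]

-- ===== PORT B =====
-- the for-loop of Source B: u runs from 1 to gi, early return None on a short row
def altLoop (triangle : List (List Int)) (gi gj : Int) (u : Int) (acc : List (Int × Int)) : Option (List (Int × Int)) :=
  if gi < u then some acc
  else
    if pvRowlen triangle u ≤ max 0 (gj - (gi - u)) then none
    else altLoop triangle gi gj (u + 1) (acc ++ [(u, max 0 (gj - (gi - u)))])
  termination_by (gi + 1 - u).toNat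
  decreasing_by omega

def bfs_pascals_triangle_alt (triangle : List (List Int)) (start : Int × Int) (goal : Int × Int) : Option (List (Int × Int)) :=
  if goal.1 = 0 ∧ goal.2 = 0 then some [((0 : Int), (0 : Int))]
  else if goal.2 < 0 ∨ goal.1 < goal.2 ∨ (triangle.length : Int) ≤ goal.1 then none
  else altLoop triangle goal.1 goal.2 1 [(0, 0)]

-- ===== PRECONDITION & SPEC =====
def Spec_bfs_pascals_triangle (triangle : List (List Int)) (start : Int × Int) (goal : Int × Int) (out : Option (List (Int × Int))) : Prop := out = bfs_pascals_triangle_alt triangle start goal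
instance (triangle : List (List Int)) (start : Int × Int) (goal : Int × Int) (out : Option (List (Int × Int))) : Decidable (Spec_bfs_pascals_triangle triangle start goal out) := by unfold Spec_bfs_pascals_triangle; infer_instance

-- ===== CLAIM (what is proved, stated in full; the proofs are below) =====
def Claim_equal_bfs_pascals_triangle : Prop := ∀ (triangle : List (List Int)) (start : Int × Int) (goal : Int × Int), Dom_bfs_pascals_triangle triangle start goal → Spec_bfs_pascals_triangle triangle start goal (bfs_pascals_triangle triangle start goal)

-- ===== LEMMAS AND PROOFS =====


-- level-u row bound check for the tail of a path: rows (i, gl.1] with column max j (gl.2-(gl.1-u))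
def pvRowsOk (tri : List (List Int)) (gl : Int × Int) (i j : Int) : Bool :=
  (List.range (gl.1 - i).toNat).all fun (t : Nat) =>
    decide (max j (gl.2 - (gl.1 - (i + 1 + (t : Int)))) < pvRowlen tri (i + 1 + (t : Int)))

-- the BFS frontier node (i,j) can still reach the goal
def pvReach (tri : List (List Int)) (gl : Int × Int) (i j : Int) : Bool :=
  decide ((i, j) = gl) ||
    (decide (i < gl.1) && decide (j ≤ gl.2) && decide (gl.2 - j ≤ gl.1 - i) &&
     decide (gl.1 < (tri.length : Int)) && pvRowsOk tri gl i j)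

-- the lexicographically first monotone path from (i,j) to the goal
def pvLex (gl : Int × Int) (i j : Int) : List (Int × Int) :=
  (i, j) :: ((List.range (gl.1 - i).toNat).map fun (t : Nat) =>
    (i + 1 + (t : Int), max j (gl.2 - (gl.1 - (i + 1 + (t : Int))))))

-- "winner" combiner: keep the higher level, ties go to the left (earlier in queue)
def pvComb (a b : Option (Int × List (Int × Int))) : Option (Int × List (Int × Int)) :=
  match a, b with
  | none, b => b
  | a, none => a
  | some (la, oa), some (lb, ob) => if la < lb then some (lb, ob) else some (la, oa)

-- the queue's winner: among reaching nodes, maximal level, earliest in queue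
def pvG (tri : List (List Int)) (gl : Int × Int) :
    List (Int × Int × List (Int × Int)) → Option (Int × List (Int × Int))
  | [] => none
  | (i, j, p) :: rest =>
    if pvReach tri gl i j = true then
      pvComb (some (i, p ++ pvLex gl i j)) (pvG tri gl rest)
    else pvG tri gl rest

theorem pvRowsOk_iff (tri : List (List Int)) (gl : Int × Int) (i j : Int) :
    pvRowsOk tri gl i j = true ↔
      ∀ u : Int, i < u → u ≤ gl.1 → max j (gl.2 - (gl.1 - u)) < pvRowlen tri u := by
  unfold pvRowsOk
  rw [List.all_eq_true]
  constructor
  · intro h u hu1 hu2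
    have ht : (u - i - 1).toNat < (gl.1 - i).toNat := by omega
    have := h _ (List.mem_range.mpr ht)
    have he : i + 1 + (((u - i - 1).toNat : Nat) : Int) = u := by omega
    rw [he] at this
    exact of_decide_eq_true this
  · intro h t ht
    have ht' := List.mem_range.mp ht
    exact decide_eq_true (h _ (by omega) (by omega))

theorem pvReach_iff (tri : List (List Int)) (gl : Int × Int) (i j : Int) :
    pvReach tri gl i j = true ↔
      ((i, j) = gl ∨ (i < gl.1 ∧ j ≤ gl.2 ∧ gl.2 - j ≤ gl.1 - i ∧ gl.1 < (tri.length : Int) ∧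
        ∀ u : Int, i < u → u ≤ gl.1 → max j (gl.2 - (gl.1 - u)) < pvRowlen tri u)) := by
  simp [pvReach, pvRowsOk_iff, Bool.or_eq_true, Bool.and_eq_true, decide_eq_true_eq, and_assoc]

theorem pvReach_le (tri : List (List Int)) (gl : Int × Int) (i j : Int)
    (h : pvReach tri gl i j = true) : i ≤ gl.1 := by
  rcases (pvReach_iff tri gl i j).1 h with h | h
  · rw [Prod.ext_iff] at h; omega
  · omega

theorem pvLex_goal (gl : Int × Int) : pvLex gl gl.1 gl.2 = [(gl.1, gl.2)] := by
  simp [pvLex]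

theorem pvLex_step0 (gl : Int × Int) (i j : Int) (hlt : i < gl.1)
    (hj : gl.2 - (gl.1 - (i + 1)) ≤ j) :
    pvLex gl i j = (i, j) :: pvLex gl (i + 1) j := by
  unfold pvLex
  have hn : (gl.1 - i).toNat = (gl.1 - (i + 1)).toNat + 1 := by omega
  rw [hn, List.range_succ_eq_map, List.map_cons, List.map_map]
  congr 1
  simp only [Nat.cast_zero, add_zero]
  rw [max_eq_left hj]
  congr 1
  refine List.map_congr_left fun t ht => ?_
  simp only [Function.comp_apply, Prod.mk.injEq]
  refine ⟨by omega, ?_⟩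
  congr 1
  omega

theorem pvLex_step1 (gl : Int × Int) (i j : Int) (hlt : i < gl.1)
    (h0 : gl.2 - j = gl.1 - i) :
    pvLex gl i j = (i, j) :: pvLex gl (i + 1) (j + 1) := by
  unfold pvLex
  have hn : (gl.1 - i).toNat = (gl.1 - (i + 1)).toNat + 1 := by omega
  rw [hn, List.range_succ_eq_map, List.map_cons, List.map_map]
  congr 1
  simp only [Nat.cast_zero, add_zero]
  rw [show gl.2 - (gl.1 - (i + 1)) = j + 1 by omega, max_eq_right (by omega : j ≤ j + 1)]
  congr 1
  refine List.map_congr_left fun t ht => ?_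
  have ht' := List.mem_range.mp ht
  simp only [Function.comp_apply, Prod.mk.injEq]
  refine ⟨by omega, ?_⟩
  have hAB : gl.2 - (gl.1 - (i + 1 + ((Nat.succ t : Nat) : Int)))
      = gl.2 - (gl.1 - (i + 1 + 1 + (t : Int))) := by omega
  have hB : j + 1 ≤ gl.2 - (gl.1 - (i + 1 + 1 + (t : Int))) := by omega
  rw [hAB, max_eq_right (by omega : j ≤ gl.2 - (gl.1 - (i + 1 + 1 + (t : Int)))),
    max_eq_right hB]

theorem pvComb_none_right (a : Option (Int × List (Int × Int))) : pvComb a none = a := by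
  rcases a with _ | ⟨la, oa⟩ <;> rfl

theorem pvComb_none_left (b : Option (Int × List (Int × Int))) : pvComb none b = b := by
  rcases b with _ | ⟨lb, ob⟩ <;> rfl

theorem pvComb_assoc (a b c : Option (Int × List (Int × Int))) :
    pvComb (pvComb a b) c = pvComb a (pvComb b c) := by
  rcases a with _ | ⟨la, oa⟩
  · simp [pvComb_none_left]
  rcases b with _ | ⟨lb, ob⟩
  · simp [pvComb_none_left, pvComb_none_right]
  rcases c with _ | ⟨lc, oc⟩
  · simp [pvComb_none_right]
  by_cases h1 : la < lb <;> by_cases h2 : lb < lc <;> by_cases h3 : la < lc <;>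
    simp [pvComb, h1, h2, h3] <;> first | rfl | (exfalso; omega)

theorem pvG_append (tri : List (List Int)) (gl : Int × Int)
    (xs ys : List (Int × Int × List (Int × Int))) :
    pvG tri gl (xs ++ ys) = pvComb (pvG tri gl xs) (pvG tri gl ys) := by
  induction xs with
  | nil => simp [pvG, pvComb_none_left]
  | cons n xs IH =>
    obtain ⟨i, j, p⟩ := n
    simp only [List.cons_append, pvG]
    rw [IH]
    split
    · rw [pvComb_assoc]
    · rfl

theorem pvG_le (tri : List (List Int)) (gl : Int × Int)
    (q : List (Int × Int × List (Int × Int))) (l : Int) (o : List (Int × Int))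
    (h : pvG tri gl q = some (l, o)) : l ≤ gl.1 := by
  induction q generalizing l o with
  | nil => simp [pvG] at h
  | cons n rest IH =>
    obtain ⟨i, j, p⟩ := n
    simp only [pvG] at h
    by_cases hr : pvReach tri gl i j = true
    · rw [if_pos hr] at h
      cases hrest : pvG tri gl rest with
      | none =>
        rw [hrest, pvComb_none_right] at h
        simp only [Option.some.injEq, Prod.mk.injEq] at h
        obtain ⟨h1, -⟩ := h
        subst h1
        exact pvReach_le tri gl i j hr
      | some v =>
        obtain ⟨lr, orr⟩ := v
        rw [hrest] at h
        simp only [pvComb] at h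
        split_ifs at h with hlt
        · simp only [Option.some.injEq, Prod.mk.injEq] at h
          obtain ⟨h1, -⟩ := h
          subst h1
          exact IH _ _ hrest
        · simp only [Option.some.injEq, Prod.mk.injEq] at h
          obtain ⟨h1, -⟩ := h
          subst h1
          exact pvReach_le tri gl i j hr
    · rw [if_neg hr] at h
      exact IH _ _ h


theorem pvReach_of_c0 (tri : List (List Int)) (gl : Int × Int) (i j : Int) (_hj : 0 ≤ j)
    (h0 : 0 ≤ i + 1 ∧ i + 1 < (tri.length : Int) ∧ 0 ≤ j ∧ j < pvRowlen tri (i + 1))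
    (hr : pvReach tri gl (i + 1) j = true) : pvReach tri gl i j = true := by
  rw [pvReach_iff] at hr ⊢
  rcases hr with hg | ⟨h1, h2, h3, h4, h5⟩
  · right
    rw [Prod.ext_iff] at hg
    obtain ⟨hg1, hg2⟩ := hg
    refine ⟨by omega, by omega, by omega, by omega, ?_⟩
    intro u hu1 hu2
    have hu : u = i + 1 := by omega
    subst hu
    rw [show gl.2 - (gl.1 - (i + 1)) = j by omega, max_self]
    exact h0.2.2.2
  · right
    refine ⟨by omega, h2, by omega, h4, ?_⟩
    intro u hu1 hu2
    by_cases hu : u = i + 1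
    · subst hu
      rw [max_eq_left (by omega)]
      exact h0.2.2.2
    · exact h5 u (by omega) hu2

theorem pvReach_of_c1 (tri : List (List Int)) (gl : Int × Int) (i j : Int) (_hj : 0 ≤ j)
    (h1b : 0 ≤ i + 1 ∧ i + 1 < (tri.length : Int) ∧ 0 ≤ j + 1 ∧ j + 1 < pvRowlen tri (i + 1))
    (hr : pvReach tri gl (i + 1) (j + 1) = true) : pvReach tri gl i j = true := by
  rw [pvReach_iff] at hr ⊢
  rcases hr with hg | ⟨h1, h2, h3, h4, h5⟩
  · right
    rw [Prod.ext_iff] at hg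
    obtain ⟨hg1, hg2⟩ := hg
    refine ⟨by omega, by omega, by omega, by omega, ?_⟩
    intro u hu1 hu2
    have hu : u = i + 1 := by omega
    subst hu
    rw [show gl.2 - (gl.1 - (i + 1)) = j + 1 by omega, max_eq_right (by omega)]
    exact h1b.2.2.2
  · right
    refine ⟨by omega, by omega, by omega, h4, ?_⟩
    intro u hu1 hu2
    by_cases hu : u = i + 1
    · subst hu
      rw [max_lt_iff]
      have h6 := h1b.2.2.2
      exact ⟨by omega, by omega⟩
    · have h6 := h5 u (by omega) hu2
      rw [max_lt_iff] at h6 ⊢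
      omega

theorem pvReach_child (tri : List (List Int)) (gl : Int × Int) (i j : Int)
    (hi : 0 ≤ i) (hj : 0 ≤ j) (hg : ¬((i, j) = gl))
    (h : pvReach tri gl i j = true) :
    ((0 ≤ i + 1 ∧ i + 1 < (tri.length : Int) ∧ 0 ≤ j ∧ j < pvRowlen tri (i + 1)) ∧
        pvReach tri gl (i + 1) j = true) ∨
    ((0 ≤ i + 1 ∧ i + 1 < (tri.length : Int) ∧ 0 ≤ j + 1 ∧ j + 1 < pvRowlen tri (i + 1)) ∧
        pvReach tri gl (i + 1) (j + 1) = true) := by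
  rw [pvReach_iff] at h
  rcases h with h | ⟨h1, h2, h3, h4, h5⟩
  · exact absurd h hg
  by_cases hP : gl.2 - j ≤ gl.1 - i - 1
  · left
    have hrow := h5 (i + 1) (by omega) (by omega)
    rw [max_eq_left (by omega)] at hrow
    refine ⟨⟨by omega, by omega, hj, hrow⟩, ?_⟩
    rw [pvReach_iff]
    by_cases hq : i + 1 = gl.1
    · left
      rw [Prod.ext_iff]
      exact ⟨by omega, by omega⟩
    · right
      exact ⟨by omega, h2, by omega, h4, fun u hu1 hu2 => h5 u (by omega) hu2⟩
  · right
    have hE : gl.2 - j = gl.1 - i := by omega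
    have hrow := h5 (i + 1) (by omega) (by omega)
    rw [show gl.2 - (gl.1 - (i + 1)) = j + 1 by omega, max_eq_right (by omega)] at hrow
    refine ⟨⟨by omega, by omega, by omega, hrow⟩, ?_⟩
    rw [pvReach_iff]
    by_cases hq : i + 1 = gl.1
    · left
      rw [Prod.ext_iff]
      exact ⟨by omega, by omega⟩
    · right
      refine ⟨by omega, by omega, by omega, h4, ?_⟩
      intro u hu1 hu2
      have h6 := h5 u (by omega) hu2
      rw [max_lt_iff] at h6 ⊢
      omega

theorem pvF4 (tri : List (List Int)) (gl : Int × Int) (i j : Int) (hj : 0 ≤ j)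
    (h1b : 0 ≤ i + 1 ∧ i + 1 < (tri.length : Int) ∧ 0 ≤ j + 1 ∧ j + 1 < pvRowlen tri (i + 1))
    (hr1 : pvReach tri gl (i + 1) (j + 1) = true)
    (hn : ¬((0 ≤ i + 1 ∧ i + 1 < (tri.length : Int) ∧ 0 ≤ j ∧ j < pvRowlen tri (i + 1)) ∧
        pvReach tri gl (i + 1) j = true)) :
    gl.2 - j = gl.1 - i := by
  by_contra hne
  rw [pvReach_iff] at hr1
  rcases hr1 with hg | ⟨h1, h2, h3, h4, h5⟩
  · rw [Prod.ext_iff] at hg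
    omega
  · have hP : gl.2 - j ≤ gl.1 - i - 1 := by omega
    apply hn
    refine ⟨⟨by omega, by omega, hj, by omega⟩, ?_⟩
    rw [pvReach_iff]
    right
    refine ⟨h1, by omega, by omega, h4, ?_⟩
    intro u hu1 hu2
    have h6 := h5 u hu1 hu2
    rw [max_lt_iff] at h6 ⊢
    omega

theorem pvG_children (tri : List (List Int)) (gl : Int × Int) (i j : Int) (p : List (Int × Int))
    (hi : 0 ≤ i) (hj : 0 ≤ j) (hg : ¬((i, j) = gl)) :
    pvG tri gl
      ((if 0 ≤ i + 1 ∧ i + 1 < (tri.length : Int) ∧ 0 ≤ j ∧ j < pvRowlen tri (i + 1)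
        then [(i + 1, j, p ++ [(i, j)])] else []) ++
       (if 0 ≤ i + 1 ∧ i + 1 < (tri.length : Int) ∧ 0 ≤ j + 1 ∧ j + 1 < pvRowlen tri (i + 1)
        then [(i + 1, j + 1, p ++ [(i, j)])] else []))
      = if pvReach tri gl i j = true then some (i + 1, p ++ pvLex gl i j) else none := by
  by_cases hb0 : 0 ≤ i + 1 ∧ i + 1 < (tri.length : Int) ∧ 0 ≤ j ∧ j < pvRowlen tri (i + 1) <;>
    by_cases hb1 : 0 ≤ i + 1 ∧ i + 1 < (tri.length : Int) ∧ 0 ≤ j + 1 ∧ j + 1 < pvRowlen tri (i + 1)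
  · rw [if_pos hb0, if_pos hb1]
    cases hr0 : pvReach tri gl (i + 1) j with
    | true =>
      have hlt : i < gl.1 := by have := pvReach_le tri gl (i + 1) j hr0; omega
      have hcond : gl.2 - (gl.1 - (i + 1)) ≤ j := by
        rcases (pvReach_iff tri gl (i + 1) j).1 hr0 with hgg | ⟨_, _, h3, _, _⟩
        · rw [Prod.ext_iff] at hgg; omega
        · omega
      rw [if_pos (pvReach_of_c0 tri gl i j hj hb0 hr0)]
      cases hr1 : pvReach tri gl (i + 1) (j + 1) <;>
        simp only [List.cons_append, List.nil_append, pvG, hr0, hr1, if_true, if_false,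
          Bool.false_eq_true, pvComb, lt_irrefl] <;>
        simp [pvLex_step0 gl i j hlt hcond]
    | false =>
      cases hr1 : pvReach tri gl (i + 1) (j + 1) with
      | true =>
        have hlt : i < gl.1 := by have := pvReach_le tri gl (i + 1) (j + 1) hr1; omega
        have hE : gl.2 - j = gl.1 - i := by
          refine pvF4 tri gl i j hj hb1 hr1 ?_
          rintro ⟨-, hh⟩
          rw [hr0] at hh
          exact Bool.false_ne_true hh
        rw [if_pos (pvReach_of_c1 tri gl i j hj hb1 hr1)]
        simp only [List.cons_append, List.nil_append, pvG, hr0, hr1, Bool.false_eq_true,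
          reduceIte, pvComb_none_right]
        simp [pvLex_step1 gl i j hlt hE]
      | false =>
        have hrf : ¬(pvReach tri gl i j = true) := by
          intro hri
          rcases pvReach_child tri gl i j hi hj hg hri with ⟨-, hc⟩ | ⟨-, hc⟩
          · rw [hr0] at hc; exact Bool.false_ne_true hc
          · rw [hr1] at hc; exact Bool.false_ne_true hc
        rw [if_neg hrf]
        simp only [List.cons_append, List.nil_append, pvG, hr0, hr1, Bool.false_eq_true,
          reduceIte]
  · rw [if_pos hb0, if_neg hb1]
    cases hr0 : pvReach tri gl (i + 1) j with
    | true =>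
      have hlt : i < gl.1 := by have := pvReach_le tri gl (i + 1) j hr0; omega
      have hcond : gl.2 - (gl.1 - (i + 1)) ≤ j := by
        rcases (pvReach_iff tri gl (i + 1) j).1 hr0 with hgg | ⟨_, _, h3, _, _⟩
        · rw [Prod.ext_iff] at hgg; omega
        · omega
      rw [if_pos (pvReach_of_c0 tri gl i j hj hb0 hr0)]
      simp only [List.append_nil, pvG, hr0, reduceIte, pvComb_none_right]
      simp [pvLex_step0 gl i j hlt hcond]
    | false =>
      have hrf : ¬(pvReach tri gl i j = true) := by
        intro hri
        rcases pvReach_child tri gl i j hi hj hg hri with ⟨-, hc⟩ | ⟨hb, -⟩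
        · rw [hr0] at hc; exact Bool.false_ne_true hc
        · exact hb1 hb
      rw [if_neg hrf]
      simp only [List.append_nil, pvG, hr0, Bool.false_eq_true, reduceIte]
  · rw [if_neg hb0, if_pos hb1]
    cases hr1 : pvReach tri gl (i + 1) (j + 1) with
    | true =>
      have hlt : i < gl.1 := by have := pvReach_le tri gl (i + 1) (j + 1) hr1; omega
      have hE : gl.2 - j = gl.1 - i := by
        refine pvF4 tri gl i j hj hb1 hr1 ?_
        rintro ⟨hb, -⟩
        exact hb0 hb
      rw [if_pos (pvReach_of_c1 tri gl i j hj hb1 hr1)]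
      simp only [List.nil_append, pvG, hr1, reduceIte, pvComb_none_right]
      simp [pvLex_step1 gl i j hlt hE]
    | false =>
      have hrf : ¬(pvReach tri gl i j = true) := by
        intro hri
        rcases pvReach_child tri gl i j hi hj hg hri with ⟨hb, -⟩ | ⟨-, hc⟩
        · exact hb0 hb
        · rw [hr1] at hc; exact Bool.false_ne_true hc
      rw [if_neg hrf]
      simp only [List.nil_append, pvG, hr1, Bool.false_eq_true, reduceIte]
  · rw [if_neg hb0, if_neg hb1]
    have hrf : ¬(pvReach tri gl i j = true) := by
      intro hri
      rcases pvReach_child tri gl i j hi hj hg hri with ⟨hb, -⟩ | ⟨hb, -⟩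
      · exact hb0 hb
      · exact hb1 hb
    rw [if_neg hrf]
    simp only [List.append_nil, pvG]


-- the 3^(levels-left) queue measure that A's while loop strictly decreases
def pvMu (tri : List (List Int)) (q : List (Int × Int × List (Int × Int))) : Nat :=
  (q.map fun n => 3 ^ (((tri.length : Int) - n.1).toNat + 1)).sum

theorem pvBfs_dec (tri : List (List Int)) (i j : Int) (path : List (Int × Int))
    (rest : List (Int × Int × List (Int × Int))) :
    pvMu tri (rest ++
      (if 0 ≤ i + 1 ∧ i + 1 < (tri.length : Int) ∧ 0 ≤ j ∧ j < pvRowlen tri (i + 1)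
       then [(i + 1, j, path ++ [(i, j)])] else []) ++
      (if 0 ≤ i + 1 ∧ i + 1 < (tri.length : Int) ∧ 0 ≤ j + 1 ∧ j + 1 < pvRowlen tri (i + 1)
       then [(i + 1, j + 1, path ++ [(i, j)])] else []))
      < pvMu tri ((i, j, path) :: rest) := by
  unfold pvMu
  simp only [List.map_append, List.sum_append, List.map_cons, List.sum_cons]
  have hpos : 0 < 3 ^ (((tri.length : Int) - i).toNat + 1) := by positivity
  split_ifs with h1 h2 h2 <;>
    simp only [List.map_cons, List.map_nil, List.sum_cons, List.sum_nil] <;>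
    [ (have he : ((tri.length : Int) - (i + 1)).toNat + 1 + 1
          = ((tri.length : Int) - i).toNat + 1 := by omega;
       have h3 : (3 : Nat) ^ (((tri.length : Int) - (i + 1)).toNat + 1)
            + 3 ^ (((tri.length : Int) - (i + 1)).toNat + 1)
          < 3 ^ (((tri.length : Int) - i).toNat + 1) := by
         rw [← he, pow_succ]
         have : 0 < 3 ^ (((tri.length : Int) - (i + 1)).toNat + 1) := by positivity
         omega;
       omega);
      (have he : ((tri.length : Int) - (i + 1)).toNat + 1 + 1
          = ((tri.length : Int) - i).toNat + 1 := by omega;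
       have h3 : (3 : Nat) ^ (((tri.length : Int) - (i + 1)).toNat + 1)
          < 3 ^ (((tri.length : Int) - i).toNat + 1) := by
         rw [← he, pow_succ]
         have : 0 < 3 ^ (((tri.length : Int) - (i + 1)).toNat + 1) := by positivity
         omega;
       omega);
      (have he : ((tri.length : Int) - (i + 1)).toNat + 1 + 1
          = ((tri.length : Int) - i).toNat + 1 := by omega;
       have h3 : (3 : Nat) ^ (((tri.length : Int) - (i + 1)).toNat + 1)
          < 3 ^ (((tri.length : Int) - i).toNat + 1) := by
         rw [← he, pow_succ]
         have : 0 < 3 ^ (((tri.length : Int) - (i + 1)).toNat + 1) := by positivity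
         omega;
       omega);
      omega ]

theorem pvRun_eq (tri : List (List Int)) (gl : Int × Int) :
    ∀ (fuel : Nat) (q : List (Int × Int × List (Int × Int))),
      pvMu tri q ≤ fuel →
      (∀ n ∈ q, 0 ≤ n.1 ∧ 0 ≤ n.2.1) →
      bfsLoop tri gl fuel q = (pvG tri gl q).map Prod.snd := by
  intro fuel
  induction fuel with
  | zero =>
    intro q hmu hq
    cases q with
    | nil => simp [bfsLoop, pvG]
    | cons n rest =>
      exfalso
      obtain ⟨i, j, p⟩ := n
      have hp : 0 < pvMu tri ((i, j, p) :: rest) := by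
        unfold pvMu
        simp only [List.map_cons, List.sum_cons]
        positivity
      omega
  | succ fuel IH =>
    intro q hmu hq
    cases q with
    | nil => simp [bfsLoop, pvG]
    | cons n rest =>
      obtain ⟨i, j, p⟩ := n
      rw [bfsLoop]
      by_cases h : (i, j) = gl
      · rw [if_pos h]
        have hr : pvReach tri gl i j = true := by
          rw [pvReach_iff]; left; exact h
        have hij : i = gl.1 ∧ j = gl.2 := Prod.ext_iff.mp h
        have hlex : pvLex gl i j = [(i, j)] := by
          obtain ⟨h1, h2⟩ := hij
          subst h1; subst h2
          exact pvLex_goal gl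
        simp only [pvG, hr, reduceIte, hlex]
        cases hrest : pvG tri gl rest with
        | none => rw [pvComb_none_right]; rfl
        | some v =>
          obtain ⟨lr, orr⟩ := v
          have hle := pvG_le tri gl rest lr orr hrest
          have hnl : ¬(i < lr) := by omega
          simp only [pvComb, if_neg hnl]
          rfl
      · rw [if_neg h]
        have hi0 : (0 : Int) ≤ i := (hq _ List.mem_cons_self).1
        have hj0 : (0 : Int) ≤ j := (hq _ List.mem_cons_self).2
        have hq' : ∀ n ∈ (rest ++
            (if 0 ≤ i + 1 ∧ i + 1 < (tri.length : Int) ∧ 0 ≤ j ∧ j < pvRowlen tri (i + 1)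
             then [(i + 1, j, p ++ [(i, j)])] else []) ++
            (if 0 ≤ i + 1 ∧ i + 1 < (tri.length : Int) ∧ 0 ≤ j + 1 ∧ j + 1 < pvRowlen tri (i + 1)
             then [(i + 1, j + 1, p ++ [(i, j)])] else [])), 0 ≤ n.1 ∧ 0 ≤ n.2.1 := by
          intro n hn
          simp only [List.mem_append] at hn
          rcases hn with (hn | hn) | hn
          · exact hq n (List.mem_cons_of_mem _ hn)
          · revert hn
            split_ifs with hh
            · intro hn
              simp only [List.mem_singleton] at hn
              subst hn
              exact ⟨show (0 : Int) ≤ i + 1 by omega, show (0 : Int) ≤ j by omega⟩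
            · intro hn
              simp at hn
          · revert hn
            split_ifs with hh
            · intro hn
              simp only [List.mem_singleton] at hn
              subst hn
              exact ⟨show (0 : Int) ≤ i + 1 by omega, show (0 : Int) ≤ j + 1 by omega⟩
            · intro hn
              simp at hn
        have hdec := pvBfs_dec tri i j p rest
        rw [IH _ (by omega) hq', List.append_assoc, pvG_append,
          pvG_children tri gl i j p hi0 hj0 h]
        simp only [pvG]
        cases hr : pvReach tri gl i j with
        | false =>
          simp only [Bool.false_eq_true, reduceIte, pvComb_none_right]
        | true =>
          simp only [reduceIte]
          cases hrest : pvG tri gl rest with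
          | none => rw [pvComb_none_left, pvComb_none_right]; rfl
          | some v =>
            obtain ⟨lr, orr⟩ := v
            simp only [pvComb]
            by_cases hlt : lr < i + 1
            · rw [if_pos hlt, if_neg (by omega : ¬(i < lr))]
              rfl
            · rw [if_neg hlt, if_pos (by omega : i < lr)]

theorem pvA_char (tri : List (List Int)) (s gl : Int × Int) :
    bfs_pascals_triangle tri s gl =
      if pvReach tri gl 0 0 = true then some (pvLex gl 0 0) else none := by
  unfold bfs_pascals_triangle
  have hmu : pvMu tri [(0, 0, [])] ≤ 3 ^ (tri.length + 1) := by
    unfold pvMu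
    simp only [List.map_cons, List.map_nil, List.sum_cons, List.sum_nil]
    simp
  rw [pvRun_eq tri gl (3 ^ (tri.length + 1)) [(0, 0, [])] hmu (by simp)]
  simp only [pvG]
  cases hr : pvReach tri gl 0 0 with
  | false => simp
  | true => simp [pvComb_none_right]

theorem pvAltLoop_eq (tri : List (List Int)) (gi gj : Int) :
    ∀ (u : Int) (acc : List (Int × Int)),
      altLoop tri gi gj u acc =
        if pvRowsOk tri (gi, gj) (u - 1) 0 = true
        then some (acc ++ ((List.range (gi + 1 - u).toNat).map fun (t : Nat) =>
          (u + (t : Int), max 0 (gj - (gi - (u + (t : Int)))))))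
        else none := by
  intro u acc
  induction u, acc using altLoop.induct tri gi gj with
  | case1 u acc hgt =>
    rw [altLoop, if_pos hgt]
    have hro : pvRowsOk tri (gi, gj) (u - 1) 0 = true := by
      rw [pvRowsOk_iff]
      intro v h1 h2
      exact absurd h2 (by omega)
    rw [if_pos hro, show (gi + 1 - u).toNat = 0 by omega]
    simp
  | case2 u acc hle hrow =>
    rw [altLoop, if_neg hle, if_pos hrow]
    have hro : ¬(pvRowsOk tri (gi, gj) (u - 1) 0 = true) := by
      intro hh
      have h1 := (pvRowsOk_iff tri (gi, gj) (u - 1) 0).1 hh u (by omega) (by omega)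
      exact absurd h1 (not_lt.mpr hrow)
    rw [if_neg hro]
  | case3 u acc hle hrow IH =>
    rw [altLoop, if_neg hle, if_neg hrow, IH]
    have hiff : pvRowsOk tri (gi, gj) (u + 1 - 1) 0 = true ↔
        pvRowsOk tri (gi, gj) (u - 1) 0 = true := by
      rw [pvRowsOk_iff, pvRowsOk_iff]
      constructor
      · intro hall v h1 h2
        by_cases hv : v = u
        · subst hv
          exact not_le.mp hrow
        · exact hall v (by omega) h2
      · intro hall v h1 h2
        exact hall v (by omega) h2
    by_cases hA : pvRowsOk tri (gi, gj) (u - 1) 0 = true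
    · rw [if_pos (hiff.mpr hA), if_pos hA, List.append_assoc]
      congr 1
      rw [show (gi + 1 - u).toNat = (gi + 1 - (u + 1)).toNat + 1 by omega,
        List.range_succ_eq_map, List.map_cons, List.map_map, List.singleton_append]
      congr 1
      simp only [Nat.cast_zero, add_zero]
      refine congrArg₂ List.cons rfl ?_
      refine List.map_congr_left fun t ht => ?_
      simp only [Function.comp_apply, Prod.mk.injEq]
      refine ⟨by omega, ?_⟩
      congr 1
      omega
    · rw [if_neg (fun hh => hA (hiff.mp hh)), if_neg hA]

theorem pvB_char (tri : List (List Int)) (s gl : Int × Int) :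
    bfs_pascals_triangle_alt tri s gl =
      if pvReach tri gl 0 0 = true then some (pvLex gl 0 0) else none := by
  unfold bfs_pascals_triangle_alt
  by_cases h1 : gl.1 = 0 ∧ gl.2 = 0
  · rw [if_pos h1]
    have hr : pvReach tri gl 0 0 = true := by
      rw [pvReach_iff]; left; rw [Prod.ext_iff]; exact ⟨h1.1.symm, h1.2.symm⟩
    rw [if_pos hr]
    unfold pvLex
    rw [show (gl.1 - 0).toNat = 0 by omega]
    simp
  · rw [if_neg h1]
    by_cases h2 : gl.2 < 0 ∨ gl.1 < gl.2 ∨ (tri.length : Int) ≤ gl.1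
    · rw [if_pos h2]
      have hr : ¬(pvReach tri gl 0 0 = true) := by
        rw [pvReach_iff]
        rintro (hgg | ⟨a, b, c, d, -⟩)
        · rw [Prod.ext_iff] at hgg
          exact h1 ⟨hgg.1.symm, hgg.2.symm⟩
        · rcases h2 with h2 | h2 | h2 <;> omega
      rw [if_neg hr]
    · rw [if_neg h2]
      push_neg at h2
      obtain ⟨hga, hgb, hgc⟩ := h2
      have hg1 : 1 ≤ gl.1 := by
        by_cases hz : gl.1 = 0
        · exact absurd ⟨hz, by omega⟩ h1
        · omega
      rw [pvAltLoop_eq tri gl.1 gl.2 1 [(0, 0)], Prod.mk.eta]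
      have hre : pvReach tri gl 0 0 = true ↔ pvRowsOk tri gl (1 - 1) 0 = true := by
        rw [pvReach_iff, pvRowsOk_iff]
        constructor
        · rintro (hgg | ⟨-, -, -, -, e⟩)
          · rw [Prod.ext_iff] at hgg
            exact absurd ⟨hgg.1.symm, hgg.2.symm⟩ h1
          · intro v hv1 hv2
            exact e v (by omega) hv2
        · intro h
          right
          exact ⟨by omega, by omega, by omega, by omega, fun v hv1 hv2 => h v (by omega) hv2⟩
      by_cases hr : pvReach tri gl 0 0 = true
      · rw [if_pos (hre.mp hr), if_pos hr]
        unfold pvLex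
        rw [List.singleton_append]
        congr 1
        rw [show (gl.1 + 1 - 1).toNat = (gl.1 - 0).toNat by omega]
        refine congrArg₂ List.cons rfl ?_
        refine List.map_congr_left fun t ht => ?_
        simp only [Prod.mk.injEq]
        refine ⟨by omega, ?_⟩
        congr 1
      · rw [if_neg (fun hh => hr (hre.mpr hh)), if_neg hr]

theorem bfs_pascals_triangle_spec : Claim_equal_bfs_pascals_triangle := by
  intro triangle start goal _
  unfold Spec_bfs_pascals_triangle
  rw [pvA_char, pvB_char]
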